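-- pv_equiv track=rewrite | github.com/JoeltheSpider/bit-byte-stuffing | server_stuff.py | rem_bit
-- ===== SOURCE A (Python) =====
-- def rem_bit(bits):
--     out=''
--     ones = 0
--     for i in bits:
--         if(ones == 5):
--             ones = 0
--             continue
--         if(i=='1'):
--             ones+=1
--         else:
--             ones=0
--         out+=i
--     return out
-- ===== SOURCE B (Python) =====
-- def rem_bit(bits):
--     out = []
--     i = 0
--     n = len(bits)
--     while i < n:
--         if bits[i:i+5] == '11111' and i + 5 < n:
--             out.append('11111')
--             i += 6
--         else:
--             out.append(bits[i])
--             i += 1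
--     return ''.join(out)
-- ===== Notes on version B (the rewrite author's own statement) =====
-- stated objective: alternative
-- what changed: Replaces the per-character ones-counter state machine with a window scan: at each index test whether the next five characters are '11111' with a sixth character present, emit the five ones and jump past six, else copy one character and advance one.
import Mathlib
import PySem

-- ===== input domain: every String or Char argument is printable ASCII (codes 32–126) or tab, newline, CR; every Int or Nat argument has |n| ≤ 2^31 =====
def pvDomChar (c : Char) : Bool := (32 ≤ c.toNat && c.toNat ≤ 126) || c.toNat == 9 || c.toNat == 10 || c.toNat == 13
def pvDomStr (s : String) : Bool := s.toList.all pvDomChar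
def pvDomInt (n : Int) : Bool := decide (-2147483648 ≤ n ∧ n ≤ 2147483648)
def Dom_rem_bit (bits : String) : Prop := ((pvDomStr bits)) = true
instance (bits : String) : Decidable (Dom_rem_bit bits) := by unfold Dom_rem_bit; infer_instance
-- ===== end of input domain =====

-- B replaces A's per-character ones-counter state machine with a five-ones window scan
-- that jumps six positions on a match (alternative decomposition, same cost).

-- ===== PORT A =====
-- A's for-loop over the characters, state (out, ones); 'continue' skips 'out += i'.
-- the loop body of A, as a named helper
def remBitStep (s : String × Int) (i : Char) : String × Int :=
  if s.2 == 5 then (s.1, 0)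
  else if i == '1' then (s.1.push i, s.2 + 1)
  else (s.1.push i, (0 : Int))

def rem_bit (bits : String) : String :=
  (bits.toList.foldl remBitStep ("", (0 : Int))).1

-- ===== PORT B =====
-- B's while-loop over indices, written as recursion on the remaining suffix of the
-- character list: 'bits[i:i+5] == "11111" and i + 5 < n' becomes the head/take/length
-- test on the suffix (exact: the length-5 slice equals five ones and a 6th character
-- exists); 'i += 6' / 'i += 1' become dropping 6 resp. 1 characters.
def remBitAltAux : List Char → List Char
  | [] => []
  | c :: r =>
    if c = '1' ∧ r.take 4 = ['1', '1', '1', '1'] ∧ 4 < r.length then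
      '1' :: '1' :: '1' :: '1' :: '1' :: remBitAltAux (r.drop 5)
    else c :: remBitAltAux r
termination_by l => l.length
decreasing_by all_goals simp

def rem_bit_alt (bits : String) : String := String.ofList (remBitAltAux bits.toList)

-- ===== PRECONDITION & SPEC =====
def Spec_rem_bit (bits : String) (out : String) : Prop := out = rem_bit_alt bits
instance (bits : String) (out : String) : Decidable (Spec_rem_bit bits out) := by unfold Spec_rem_bit; infer_instance

-- ===== CLAIM (what is proved, stated in full; the proofs are below) =====
def Claim_equal_rem_bit : Prop := ∀ (bits : String), Dom_rem_bit bits → Spec_rem_bit bits (rem_bit bits)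

-- ===== LEMMAS AND PROOFS =====

-- recursive form of A's loop
def remBitARec : Int → List Char → List Char
  | _, [] => []
  | o, c :: r =>
    if o == 5 then remBitARec 0 r
    else if c == '1' then c :: remBitARec (o + 1) r
    else c :: remBitARec 0 r

theorem remBitA_foldl (l : List Char) : ∀ (out : String) (o : Int),
    ((l.foldl remBitStep (out, o)).1).toList = out.toList ++ remBitARec o l := by
  induction l with
  | nil => intro out o; simp [remBitARec]
  | cons c r ih =>
    intro out o
    rw [List.foldl_cons]
    by_cases h5 : o == 5
    · have hstep : remBitStep (out, o) c = (out, 0) := by simp [remBitStep, h5]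
      rw [hstep, ih]
      simp [remBitARec, h5]
    · by_cases h1 : c == '1'
      · have hstep : remBitStep (out, o) c = (out.push c, o + 1) := by
          simp [remBitStep, h5, h1]
        rw [hstep, ih]
        simp [remBitARec, h5, h1, String.toList_push]
      · have hstep : remBitStep (out, o) c = (out.push c, 0) := by
          simp [remBitStep, h5, h1]
        rw [hstep, ih]
        simp [remBitARec, h5, h1, String.toList_push]

theorem remBitAlt_ones_cons {c : Char} (hc : ¬ c = '1') (r : List Char) :
    ∀ k, k ≤ 4 →
    remBitAltAux (List.replicate k '1' ++ c :: r)
      = List.replicate k '1' ++ c :: remBitAltAux r := by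
  intro k hk
  interval_cases k <;>
    simp [remBitAltAux, hc, List.take, List.replicate]

theorem remBitAlt_eq_rec (l : List Char) : ∀ k : ℕ, k ≤ 5 →
    remBitAltAux (List.replicate k '1' ++ l)
      = List.replicate k '1' ++ remBitARec (k : Int) l := by
  induction l with
  | nil =>
    intro k hk
    interval_cases k <;> simp [remBitAltAux, remBitARec, List.replicate]
  | cons c r ih =>
    intro k hk
    have ih0 : remBitAltAux r = remBitARec 0 r := by
      have h := ih 0 (by omega)
      simpa using h
    by_cases h5 : k = 5
    · subst h5
      have hrep : (List.replicate 5 '1' : List Char) = ['1', '1', '1', '1', '1'] := rfl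
      have hB : remBitAltAux ('1' :: '1' :: '1' :: '1' :: '1' :: c :: r)
          = '1' :: '1' :: '1' :: '1' :: '1' :: remBitAltAux r := by
        rw [remBitAltAux]
        simp
      have hA : remBitARec ((5 : ℕ) : Int) (c :: r) = remBitARec 0 r := by
        simp [remBitARec]
      rw [hrep, List.cons_append, List.cons_append, List.cons_append, List.cons_append,
        List.cons_append, List.nil_append, hB, ih0, hA]
      simp
    · have hk4 : k ≤ 4 := by omega
      by_cases h1 : c = '1'
      · subst h1
        have hrepl : List.replicate k '1' ++ '1' :: r
            = List.replicate (k + 1) '1' ++ r := by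
          simp [List.replicate_succ' (n := k)]
        rw [hrepl, ih (k + 1) (by omega)]
        have hA : remBitARec (k : Int) ('1' :: r) = '1' :: remBitARec ((k : Int) + 1) r := by
          have h5' : ¬ ((k : Int) == 5) := by simp; omega
          simp [remBitARec, h5']
        rw [hA]
        have hcast : (((k + 1 : ℕ)) : ℤ) = (k : Int) + 1 := by push_cast; ring
        rw [hcast]
        simp [List.replicate_succ' (n := k)]
      · rw [remBitAlt_ones_cons h1 r k hk4]
        have hA : remBitARec (k : Int) (c :: r) = c :: remBitARec 0 r := by
          have h5' : ¬ ((k : Int) == 5) := by simp; omega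
          have h1' : ¬ (c == '1') := by simpa using h1
          simp [remBitARec, h5', h1']
        rw [hA, ih0]

-- ===== VERDICT (by name: the statement is the Claim_ definition above) =====
theorem rem_bit_spec : Claim_equal_rem_bit := by
  intro bits _
  unfold Spec_rem_bit rem_bit rem_bit_alt
  apply String.toList_inj.mp
  rw [remBitA_foldl, String.toList_ofList]
  have h := remBitAlt_eq_rec bits.toList 0 (by omega)
  simpa using h.symm
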